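-- pv_equiv track=rewrite | github.com/Koozzi/Algorithms | SAMSUNG/BOJ/17140_이차원배열과연산_20210423.py | rotate_board
-- ===== SOURCE A (Python) =====
-- def rotate_board(current_board):
--     new_board = []
--     max_len = 0
--     for row in current_board:
--         dic = {}
--         for num in row:
--             if num == 0: continue
--             if num in dic:
--                 dic[num] += 1
--             elif num not in dic:
--                 dic[num] = 1
--
--         tmp_list = []
--         for num, cnt in dic.items():
--             tmp_list.append([num, cnt])
--
--         tmp_list.sort(key=lambda x: (x[1], x[0]))
--
--         new_list = []
--         for num, cnt in tmp_list:
--             new_list.append(num)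
--             new_list.append(cnt)
--
--         max_len = max(max_len, len(new_list))
--         new_board.append(new_list)
--
--     for i in range(len(new_board)):
--         for _ in range(max_len - len(new_board[i])):
--             new_board[i].append(0)
--
--     return new_board
-- ===== SOURCE B (Python) =====
-- def rotate_board(current_board):
--     rows = []
--     for row in current_board:
--         # one sort of the raw values by the composite key (frequency, value),
--         # then run-length-encode the sorted sequence: runs appear exactly in
--         # A's (count, value) pair order.
--         vals = sorted((x for x in row if x != 0), key=lambda v: (row.count(v), v))
--         flat = []
--         i = 0
--         while i < len(vals):
--             j = i + 1
--             while j < len(vals) and vals[j] == vals[i]: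
--                 j += 1
--             flat.append(vals[i])
--             flat.append(j - i)
--             i = j
--         rows.append(flat)
--     width = max(map(len, rows), default=0)
--     return [r + [0] * (width - len(r)) for r in rows]
-- ===== Notes on version B (the rewrite author's own statement) =====
-- stated objective: alternative
-- what changed: Instead of hash-counting each row into (value,count) pairs and sorting the pairs, B sorts the raw nonzero values once by the composite key (frequency, value) and run-length-encodes the sorted sequence into value,count output; padding becomes arithmetic list extension to the global max length.
import Mathlib
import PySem

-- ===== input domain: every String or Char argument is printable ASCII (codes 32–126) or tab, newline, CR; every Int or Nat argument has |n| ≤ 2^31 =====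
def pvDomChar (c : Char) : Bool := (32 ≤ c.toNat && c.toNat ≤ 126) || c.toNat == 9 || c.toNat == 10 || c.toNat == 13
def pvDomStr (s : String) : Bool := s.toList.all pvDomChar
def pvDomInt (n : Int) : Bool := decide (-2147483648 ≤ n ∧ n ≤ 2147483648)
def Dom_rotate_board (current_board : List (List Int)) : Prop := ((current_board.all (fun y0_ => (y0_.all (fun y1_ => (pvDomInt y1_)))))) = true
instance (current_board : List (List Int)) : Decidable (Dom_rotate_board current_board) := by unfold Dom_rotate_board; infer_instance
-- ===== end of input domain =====

-- B replaces A's per-row hash-count + pair-sort by one sort of the raw nonzero values under the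
-- composite key (frequency, value) followed by a run-length-encoding scan; objective: alternative
-- (not faster). Equivalence is about the return value.

-- ===== PORT A =====
-- per-row body of A's outer loop: dict count (skipping zeros), items, sort by (cnt, num), flatten
def pvRowA (row : List Int) : List Int :=
  let dic := row.foldl (fun (d : PySem.Dict Int Int) num =>
    if num == 0 then d
    else if d.contains num then d.insert num (d.getD num 0 + 1)
    else if !d.contains num then d.insert num 1
    else d) PySem.Dict.empty
  let tmp_list := dic.items
  let tmp_sorted := PySem.List.sorted2 tmp_list (fun x => x.2) (fun x => x.1) false
  tmp_sorted.foldl (fun acc p => acc ++ [p.1, p.2]) []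

def rotate_board (current_board : List (List Int)) : List (List Int) :=
  let st := current_board.foldl (fun (st : List (List Int) × Int) row =>
    let new_list := pvRowA row
    (st.1 ++ [new_list], max st.2 (new_list.length : Int))) ([], 0)
  -- the indexed in-place padding loop, as a per-row append loop
  st.1.map (fun r => (PySem.List.pyRange 0 (st.2 - (r.length : Int)) 1).foldl
    (fun acc _ => acc ++ [0]) r)

-- ===== PORT B =====
-- the two nested while loops of Source B: scan the sorted values run by run, emitting value, run length
def pvRle : List Int → List Int
  | [] => []
  | v :: rest =>
    v :: (1 + ((rest.takeWhile (fun x => x == v)).length : Int))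
      :: pvRle (rest.dropWhile (fun x => x == v))
  termination_by l => l.length
  decreasing_by
    have := List.length_dropWhile_le (fun x => x == v) rest
    simp; omega

-- per-row body of B: sort nonzero values by (row.count(v), v) — Python tuple key — then RLE
def pvRowB (row : List Int) : List Int :=
  pvRle (PySem.List.sorted (row.filter (fun x => decide (x ≠ 0)))
    (fun v => toLex ((row.count v : Int), v)) false)

def rotate_board_alt (current_board : List (List Int)) : List (List Int) :=
  let rows := current_board.map pvRowB
  let width := PySem.List.maxD (rows.map (fun r => (r.length : Int))) (fun x => x) 0
  rows.map (fun r => r ++ PySem.List.pyRepeat [0] (width - (r.length : Int)))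

-- ===== PRECONDITION & SPEC =====
def Spec_rotate_board (current_board : List (List Int)) (out : List (List Int)) : Prop := out = rotate_board_alt current_board
instance (current_board : List (List Int)) (out : List (List Int)) : Decidable (Spec_rotate_board current_board out) := by unfold Spec_rotate_board; infer_instance

-- ===== CLAIM (what is proved, stated in full; the proofs are below) =====
def Claim_equal_rotate_board : Prop := ∀ (current_board : List (List Int)), Dom_rotate_board current_board → Spec_rotate_board current_board (rotate_board current_board)

-- ===== LEMMAS AND PROOFS =====

-- A's dict loop over a row is Counter(nonzeros)
theorem pvDictEqCounter (row : List Int) :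
    row.foldl (fun (d : PySem.Dict Int Int) num =>
      if num == 0 then d
      else if d.contains num then d.insert num (d.getD num 0 + 1)
      else if !d.contains num then d.insert num 1
      else d) PySem.Dict.empty
    = PySem.Dict.counter (row.filter (fun x => decide (x ≠ 0))) := by
  rw [← PySem.Dict.foldl_insert_getD_add_one_eq_counter, List.foldl_filter]
  congr 1
  funext d num
  by_cases h0 : num = 0
  · simp [h0]
  · cases hc : d.contains num with
    | true => simp [h0]
    | false => simp [h0, PySem.Dict.getD_of_not_contains d 0 hc]

-- Python's tuple-key sort by (p[1], p[0]) is the single-key sort by the lexicographic key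
theorem pvSorted2EqSortedLex (xs : List (Int × Int)) :
    PySem.List.sorted2 xs (fun p => p.2) (fun p => p.1) false
    = PySem.List.sorted xs (fun p => toLex (p.2, p.1)) false := by
  have hb : (fun (a b : Int × Int) =>
        decide (a.2 < b.2) || (!decide (b.2 < a.2) && decide (a.1 < b.1)))
      = (fun (a b : Int × Int) => decide (toLex (a.2, a.1) < toLex (b.2, b.1))) := by
    funext a b
    by_cases h1 : a.2 < b.2 <;> by_cases h2 : b.2 < a.2 <;>
      simp [Prod.Lex.toLex_lt_toLex, h1, h2] <;> omega
  simp only [PySem.List.sorted2, PySem.List.sorted, Bool.false_eq_true, if_false]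
  congr 1
  funext acc x
  exact congrFun (congrFun (congrArg PySem.List.insertBy hb) x) acc

-- a run of equal values followed by values different from v: takeWhile/dropWhile split at the run
theorem pvTakeDropRep (v : Int) (m : Nat) (rest : List Int) (h : ∀ x ∈ rest, x ≠ v) :
    (List.replicate m v ++ rest).takeWhile (fun x => x == v) = List.replicate m v ∧
    (List.replicate m v ++ rest).dropWhile (fun x => x == v) = rest := by
  induction m with
  | zero =>
    cases rest with
    | nil => simp
    | cons y ys =>
      have hy : (y == v) = false := by simpa using h y (by simp)
      simp [hy]
  | succ n ih => simpa [List.replicate_succ] using ih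

-- RLE of concatenated runs with positive lengths and pairwise-distinct values is the pair list
theorem pvRleFlat (P : List (Int × Int)) (hpos : ∀ p ∈ P, 1 ≤ p.2)
    (hnd : (P.map Prod.fst).Nodup) :
    pvRle (P.flatMap (fun p => List.replicate p.2.toNat p.1))
      = P.flatMap (fun p => [p.1, p.2]) := by
  induction P with
  | nil => simp [pvRle]
  | cons p t ih =>
    obtain ⟨v, c⟩ := p
    have hc : (1 : Int) ≤ c := hpos (v, c) (by simp)
    rw [List.map_cons, List.nodup_cons] at hnd
    have hrest : ∀ x ∈ t.flatMap (fun p => List.replicate p.2.toNat p.1), x ≠ v := by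
      intro x hx
      simp only [List.mem_flatMap, List.mem_replicate] at hx
      obtain ⟨q, hq, -, rfl⟩ := hx
      intro hxv
      exact hnd.1 (by simpa [hxv] using List.mem_map_of_mem (f := Prod.fst) hq)
    have hm : c.toNat = (c.toNat - 1) + 1 := by omega
    rw [List.flatMap_cons, hm, List.replicate_succ, List.cons_append, pvRle]
    obtain ⟨htk, hdr⟩ := pvTakeDropRep v (c.toNat - 1) _ hrest
    rw [htk, hdr, ih (fun q hq => hpos q (by simp [hq])) hnd.2]
    simp only [List.flatMap_cons, List.length_replicate]
    have hh : (1 : Int) + ((c.toNat - 1 : Nat) : Int) = c := by omega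
    rw [hh]
    rfl

-- A's outer fold builds the mapped rows plus the running max of their lengths
theorem pvFoldA (f : List Int → List Int) (l : List (List Int)) (b : List (List Int)) (m : Int) :
    l.foldl (fun (st : List (List Int) × Int) row =>
      (st.1 ++ [f row], max st.2 ((f row).length : Int))) (b, m)
    = (b ++ l.map f,
       (l.map (fun row => ((f row).length : Int))).foldl max m) := by
  induction l generalizing b m with
  | nil => simp
  | cons x t ih => simp [ih]

-- appending one zero per loop iteration is appending a block of zeros
theorem pvFoldAppendZero {α : Type} (l : List α) (acc : List Int) :
    l.foldl (fun acc _ => acc ++ [0]) acc = acc ++ List.replicate l.length 0 := by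
  induction l generalizing acc with
  | nil => simp
  | cons x t ih =>
    rw [List.foldl_cons, ih, List.append_assoc]
    congr 1

theorem pvLenPyRange (n : Int) : (PySem.List.pyRange 0 n 1).length = n.toNat := by
  simp [PySem.List.pyRange]; omega

-- A's running max over 0-initialised lengths is B's max(..., default=0)
theorem pvMaxEq (lens : List Int) (h : ∀ x ∈ lens, 0 ≤ x) :
    lens.foldl max 0 = PySem.List.maxD lens (fun x => x) 0 := by
  cases lens with
  | nil => simp [PySem.List.maxD, PySem.List.max?]
  | cons x t =>
    have hx : max 0 x = x := max_eq_right (h x (by simp))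
    simp [PySem.List.maxD, PySem.List.max?_id_cons, List.foldl, hx]

-- counting in a flatMap of runs over distinct values
theorem pvFlatCount (ks : List Int) (c : Int → Nat) (x : Int) (hnd : ks.Nodup) :
    (ks.flatMap (fun k => List.replicate (c k) k)).count x
      = if x ∈ ks then c x else 0 := by
  induction ks with
  | nil => simp
  | cons k t ih =>
    rw [List.nodup_cons] at hnd
    rw [List.flatMap_cons, List.count_append, List.count_replicate, ih hnd.2]
    by_cases hxk : x = k
    · subst hxk; simp [hnd.1]
    · simp [hxk, Ne.symm hxk]

-- element-level order of a flatMap of runs whose pair keys are nondecreasing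
theorem pvFlatPairwise (P : List (Int × Int)) (K : Int → Lex (Int × Int))
    (hK : ∀ p ∈ P, K p.1 = toLex (p.2, p.1))
    (hP : P.Pairwise (fun p q => toLex (p.2, p.1) ≤ toLex (q.2, q.1))) :
    (P.flatMap (fun p => List.replicate p.2.toNat p.1)).Pairwise (fun a b => K a ≤ K b) := by
  induction P with
  | nil => simp
  | cons p t ih =>
    obtain ⟨hhead, htail⟩ := List.pairwise_cons.mp hP
    rw [List.flatMap_cons, List.pairwise_append]
    refine ⟨?_, ih (fun q hq => hK q (List.mem_cons_of_mem _ hq)) htail, ?_⟩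
    · exact List.pairwise_replicate.mpr (Or.inr le_rfl)
    · intro a ha b hb
      obtain ⟨-, rfl⟩ := List.mem_replicate.mp ha
      simp only [List.mem_flatMap, List.mem_replicate] at hb
      obtain ⟨q, hq, -, rfl⟩ := hb
      rw [hK p (List.mem_cons_self), hK q (List.mem_cons_of_mem _ hq)]
      exact hhead q hq

-- B's single sort of the values by (count, value) is the concatenation of the runs
-- given by A's sorted (value, count) pairs
theorem pvSortedValsEq (row : List Int) :
    PySem.List.sorted (row.filter (fun x => decide (x ≠ 0)))
      (fun v => toLex ((row.count v : Int), v)) false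
    = (PySem.List.sorted ((PySem.Dict.counter (row.filter (fun x => decide (x ≠ 0)))).items)
        (fun p => toLex (p.2, p.1)) false).flatMap
        (fun p => List.replicate p.2.toNat p.1) := by
  set vals := row.filter (fun x => decide (x ≠ 0)) with hvals
  set K : Int → Lex (Int × Int) := fun v => toLex ((row.count v : Int), v) with hKdef
  set spairs := PySem.List.sorted ((PySem.Dict.counter vals).items)
      (fun p => toLex (p.2, p.1)) false with hsp
  have hmemp : ∀ p ∈ spairs, p.1 ∈ vals ∧ p.2 = ((vals.count p.1 : Int)) := by
    intro p hp
    rw [hsp, PySem.List.mem_sorted, PySem.Dict.items_counter] at hp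
    simp only [List.mem_map] at hp
    obtain ⟨k, hk, rfl⟩ := hp
    exact ⟨(PySem.Set.mem_ofList _ _).mp hk, rfl⟩
  have hcnt : ∀ x ∈ vals, vals.count x = row.count x := by
    intro x hx
    rw [hvals] at hx ⊢
    exact List.count_filter (List.mem_filter.mp hx).2
  have hKp : ∀ p ∈ spairs, K p.1 = toLex (p.2, p.1) := by
    intro p hp
    obtain ⟨hmem, hc⟩ := hmemp p hp
    rw [hKdef]
    simp only
    rw [← hcnt p.1 hmem, hc]
  have hperm2 : (spairs.flatMap (fun p => List.replicate p.2.toNat p.1)).Perm vals := by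
    have h1 : spairs.Perm ((PySem.Dict.counter vals).items) := PySem.List.sorted_perm _ _ _
    refine (List.Perm.flatMap_right _ h1).trans ?_
    rw [PySem.Dict.items_counter, List.flatMap_map]
    simp only [Int.toNat_natCast]
    rw [List.perm_iff_count]
    intro x
    rw [pvFlatCount (PySem.Set.ofList vals) (fun k => vals.count k) x
      (PySem.Set.nodup_ofList _)]
    by_cases hx : x ∈ vals
    · rw [if_pos ((PySem.Set.mem_ofList _ _).mpr hx)]
    · rw [if_neg (fun h => hx ((PySem.Set.mem_ofList _ _).mp h)),
        List.count_eq_zero_of_not_mem hx]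
  refine List.Perm.eq_of_pairwise (le := fun a b => K a ≤ K b) ?_ ?_ ?_ ?_
  · intro a b _ _ h1 h2
    have h3 : K a = K b := le_antisymm h1 h2
    exact congrArg (fun l => (ofLex l).2) h3
  · exact PySem.List.sorted_pairwise _ _
  · exact pvFlatPairwise spairs K hKp (PySem.List.sorted_pairwise _ _)
  · exact (PySem.List.sorted_perm _ _ _).trans hperm2.symm

-- the per-row results agree
theorem pvRowEq (row : List Int) : pvRowA row = pvRowB row := by
  unfold pvRowA pvRowB
  simp only [pvDictEqCounter, pvSorted2EqSortedLex, PySem.List.foldl_append_eq_flatMap,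
    List.nil_append]
  rw [pvSortedValsEq, pvRleFlat]
  · intro p hp
    rw [PySem.List.mem_sorted, PySem.Dict.items_counter] at hp
    simp only [List.mem_map] at hp
    obtain ⟨k, hk, rfl⟩ := hp
    have hm : k ∈ (row.filter (fun x => decide (x ≠ 0))) := (PySem.Set.mem_ofList _ _).mp hk
    have hcp := List.count_pos_iff.mpr hm
    simp only
    omega
  · have hperm : ((PySem.List.sorted ((PySem.Dict.counter
        (row.filter (fun x => decide (x ≠ 0)))).items)
        (fun p => toLex (p.2, p.1)) false).map Prod.fst).Perm
        (((PySem.Dict.counter (row.filter (fun x => decide (x ≠ 0)))).items).map Prod.fst) :=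
      List.Perm.map _ (PySem.List.sorted_perm _ _ _)
    refine hperm.symm.nodup ?_
    rw [PySem.Dict.items_counter, List.map_map,
      show (Prod.fst ∘ fun k : Int =>
          (k, ((row.filter (fun x => decide (x ≠ 0))).count k : Int))) = id from rfl,
      List.map_id]
    exact PySem.Set.nodup_ofList _

-- ===== VERDICT (by name: the statement is the Claim_ definition above) =====
theorem rotate_board_spec : Claim_equal_rotate_board := by
  intro board _
  unfold Spec_rotate_board rotate_board rotate_board_alt
  simp only [pvRowEq, pvFoldA, List.nil_append]
  have hmax : (board.map (fun row => ((pvRowB row).length : Int))).foldl max 0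
      = PySem.List.maxD ((board.map pvRowB).map (fun r => (r.length : Int))) (fun x => x) 0 := by
    have h2 : (board.map pvRowB).map (fun r => (r.length : Int))
        = board.map (fun row => ((pvRowB row).length : Int)) := by
      simp [List.map_map]
    rw [h2]
    exact pvMaxEq _ (by intro x hx; simp at hx; obtain ⟨r, _, rfl⟩ := hx; positivity)
  rw [hmax]
  apply List.map_congr_left
  intro r _
  rw [PySem.List.pyRepeat_singleton, pvFoldAppendZero, pvLenPyRange]
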